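-- pv_equiv track=rewrite | github.com/samucj73/Test-rouket | TErm777.py | gerar_entrada_com_vizinhos
-- ===== SOURCE A (Python) =====
-- ROULETTE_ORDER = [
--     0, 32, 15, 19, 4, 21, 2, 25, 17, 34, 6, 27,
--     13, 36, 11, 30, 8, 23, 10, 5, 24, 16, 33, 1,
--     20, 14, 31, 9, 22, 18, 29, 7, 28, 12, 35, 3, 26
-- ]
--
-- def gerar_entrada_com_vizinhos(terminais):
--     numeros_terminal = [n for n in range(37) if n % 10 in terminais]
--     vizinhos = set()
--     for n in numeros_terminal:
--         idx = ROULETTE_ORDER.index(n)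
--         for i in range(-2, 3):
--             vizinhos.add(ROULETTE_ORDER[(idx + i) % len(ROULETTE_ORDER)])
--     return sorted(vizinhos)
-- ===== SOURCE B (Python) =====
-- ROULETTE_ORDER = [
--     0, 32, 15, 19, 4, 21, 2, 25, 17, 34, 6, 27,
--     13, 36, 11, 30, 8, 23, 10, 5, 24, 16, 33, 1,
--     20, 14, 31, 9, 22, 18, 29, 7, 28, 12, 35, 3, 26
-- ]
--
-- def gerar_entrada_com_vizinhos(terminais):
--     # Inward scan: keep each wheel slot whose +-2 window holds a terminal number.
--     result = []
--     for pos in range(37):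
--         if any(ROULETTE_ORDER[(pos + i) % 37] % 10 in terminais for i in range(-2, 3)):
--             result.append(ROULETTE_ORDER[pos])
--     return sorted(result)
-- ===== Notes on version B (the rewrite author's own statement) =====
-- stated objective: alternative
-- what changed: Instead of collecting the terminal numbers and dilating each outward via ROULETTE_ORDER.index, B scans every wheel position once and keeps its number when some offset between minus two and plus two lands on a slot whose number's last digit is a terminal (inward membership test); no numeros_terminal list and no .index call.
import Mathlib
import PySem

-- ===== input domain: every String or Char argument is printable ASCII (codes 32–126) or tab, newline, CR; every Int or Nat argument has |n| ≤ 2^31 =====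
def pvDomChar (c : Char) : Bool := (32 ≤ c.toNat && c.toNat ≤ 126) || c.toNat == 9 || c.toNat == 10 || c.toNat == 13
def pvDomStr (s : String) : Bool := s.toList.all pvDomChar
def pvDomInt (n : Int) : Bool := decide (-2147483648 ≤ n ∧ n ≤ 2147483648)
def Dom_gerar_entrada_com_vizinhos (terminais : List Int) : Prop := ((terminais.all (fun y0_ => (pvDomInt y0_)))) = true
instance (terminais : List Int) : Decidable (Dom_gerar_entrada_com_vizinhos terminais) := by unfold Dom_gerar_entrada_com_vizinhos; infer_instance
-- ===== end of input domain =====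

-- B scans each wheel position once and keeps it when its ±2 window holds a terminal
-- number (inward membership test), instead of A's outward dilation via .index; same
-- result, objective: alternative (A mutates nothing; return values proved equal).

def ROULETTE_ORDER : List Int :=
  [0, 32, 15, 19, 4, 21, 2, 25, 17, 34, 6, 27,
   13, 36, 11, 30, 8, 23, 10, 5, 24, 16, 33, 1,
   20, 14, 31, 9, 22, 18, 29, 7, 28, 12, 35, 3, 26]

-- ===== PORT A =====
def gerar_entrada_com_vizinhos (terminais : List Int) : List Int :=
  let numeros_terminal :=
    (PySem.List.pyRange 0 37 1).filter (fun n => terminais.contains (PySem.Int.mod n 10))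
  let vizinhos : PySem.Set Int :=
    numeros_terminal.foldl
      (fun viz n =>
        -- ROULETTE_ORDER.index(n): n is always a member here, so index? is some
        let idx : Int := (((PySem.List.index? ROULETTE_ORDER n).getD 0 : Nat) : Int)
        (PySem.List.pyRange (-2) 3 1).foldl
          (fun viz i =>
            PySem.Set.add viz
              (PySem.List.pyGetD ROULETTE_ORDER (PySem.Int.mod (idx + i) 37) 0))
          viz)
      PySem.Set.empty
  PySem.List.sorted vizinhos (fun x => x) false

-- ===== PORT B =====
def gerar_entrada_com_vizinhos_alt (terminais : List Int) : List Int :=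
  let result :=
    (PySem.List.pyRange 0 37 1).foldl
      (fun res pos =>
        if (PySem.List.pyRange (-2) 3 1).any (fun i =>
              terminais.contains
                (PySem.Int.mod
                  (PySem.List.pyGetD ROULETTE_ORDER (PySem.Int.mod (pos + i) 37) 0) 10))
        then res ++ [PySem.List.pyGetD ROULETTE_ORDER pos 0]
        else res)
      []
  PySem.List.sorted result (fun x => x) false

-- ===== PRECONDITION & SPEC =====
def Spec_gerar_entrada_com_vizinhos (terminais : List Int) (out : List Int) : Prop := out = gerar_entrada_com_vizinhos_alt terminais
instance (terminais : List Int) (out : List Int) : Decidable (Spec_gerar_entrada_com_vizinhos terminais out) := by unfold Spec_gerar_entrada_com_vizinhos; infer_instance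

-- ===== CLAIM (what is proved, stated in full; the proofs are below) =====
def Claim_equal_gerar_entrada_com_vizinhos : Prop := ∀ (terminais : List Int), Dom_gerar_entrada_com_vizinhos terminais → Spec_gerar_entrada_com_vizinhos terminais (gerar_entrada_com_vizinhos terminais)

-- ===== LEMMAS AND PROOFS =====

-- the index of n in ROULETTE_ORDER, as A computes it
def ridx (n : Int) : Int := (((PySem.List.index? ROULETTE_ORDER n).getD 0 : Nat) : Int)

-- membership in the inner fold of A (adding the 5-window of one number)
theorem mem_foldl_add {M : List Int} {s : PySem.Set Int} {f : Int → Int} {x : Int} :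
    x ∈ M.foldl (fun s i => PySem.Set.add s (f i)) s ↔ x ∈ s ∨ ∃ i ∈ M, x = f i := by
  induction M generalizing s with
  | nil => simp
  | cons a M ih =>
    simp only [List.foldl_cons, ih, PySem.Set.mem_add, List.mem_cons]
    constructor
    · rintro (( h | h) | ⟨i, hi, hx⟩)
      · exact Or.inl h
      · exact Or.inr ⟨a, Or.inl rfl, h⟩
      · exact Or.inr ⟨i, Or.inr hi, hx⟩
    · rintro (h | ⟨i, (rfl | hi), hx⟩)
      · exact Or.inl (Or.inl h)
      · exact Or.inl (Or.inr hx)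
      · exact Or.inr ⟨i, hi, hx⟩

-- nodup is preserved by the inner fold
theorem nodup_foldl_add {M : List Int} {s : PySem.Set Int} {f : Int → Int}
    (hs : s.Nodup) : (M.foldl (fun s i => PySem.Set.add s (f i)) s).Nodup := by
  induction M generalizing s with
  | nil => exact hs
  | cons a M ih => exact ih (show (PySem.Set.add s (f a)).Nodup from PySem.Set.nodup_add s (f a) hs)

-- membership in A's outer fold
theorem mem_foldl_outer {L M : List Int} {s : PySem.Set Int} {f : Int → Int → Int} {x : Int} :
    x ∈ L.foldl (fun s n => M.foldl (fun s i => PySem.Set.add s (f n i)) s) s ↔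
      x ∈ s ∨ ∃ n ∈ L, ∃ i ∈ M, x = f n i := by
  induction L generalizing s with
  | nil => simp
  | cons a L ih =>
    simp only [List.foldl_cons, ih, mem_foldl_add, List.mem_cons]
    constructor
    · rintro ((h | ⟨i, hi, hx⟩) | ⟨n, hn, w⟩)
      · exact Or.inl h
      · exact Or.inr ⟨a, Or.inl rfl, i, hi, hx⟩
      · exact Or.inr ⟨n, Or.inr hn, w⟩
    · rintro (h | ⟨n, (rfl | hn), w⟩)
      · exact Or.inl (Or.inl h)
      · exact Or.inl (Or.inr w)
      · exact Or.inr ⟨n, hn, w⟩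

theorem nodup_foldl_outer {L M : List Int} {s : PySem.Set Int} {f : Int → Int → Int}
    (hs : s.Nodup) :
    (L.foldl (fun s n => M.foldl (fun s i => PySem.Set.add s (f n i)) s) s).Nodup := by
  induction L generalizing s with
  | nil => exact hs
  | cons a L ih => exact ih (nodup_foldl_add hs)

-- concrete facts about the wheel, all decided on the 37 slots
theorem ridx_spec : ∀ n ∈ PySem.List.pyRange 0 37 1,
    0 ≤ ridx n ∧ ridx n < 37 ∧ PySem.List.pyGetD ROULETTE_ORDER (ridx n) 0 = n := by decide

theorem ridx_get : ∀ p ∈ PySem.List.pyRange 0 37 1,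
    ridx (PySem.List.pyGetD ROULETTE_ORDER p 0) = p := by decide

theorem get_mem_range : ∀ p ∈ PySem.List.pyRange 0 37 1,
    PySem.List.pyGetD ROULETTE_ORDER p 0 ∈ PySem.List.pyRange 0 37 1 := by decide

theorem mod37_mem_range (a : Int) : PySem.Int.mod a 37 ∈ PySem.List.pyRange 0 37 1 := by
  rw [PySem.List.mem_pyRange_one]
  exact ⟨PySem.Int.mod_nonneg a (by omega), PySem.Int.mod_lt a (by omega)⟩

-- ROULETTE_ORDER read back from indexing, and its nodup (for B's side)
theorem map_get_eq_order :
    (PySem.List.pyRange 0 37 1).map (fun p => PySem.List.pyGetD ROULETTE_ORDER p 0) =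
      ROULETTE_ORDER := by decide

theorem nodup_order : ROULETTE_ORDER.Nodup := by decide

-- the two unsorted collections have the same members
theorem same_members (terminais : List Int) (x : Int) :
    (x ∈ (((PySem.List.pyRange 0 37 1).filter
            (fun n => terminais.contains (PySem.Int.mod n 10))).foldl
          (fun viz n =>
            (PySem.List.pyRange (-2) 3 1).foldl
              (fun viz i =>
                PySem.Set.add viz
                  (PySem.List.pyGetD ROULETTE_ORDER (PySem.Int.mod (ridx n + i) 37) 0))
              viz)
          PySem.Set.empty)) ↔
    (x ∈ ((PySem.List.pyRange 0 37 1).filter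
          (fun pos => (PySem.List.pyRange (-2) 3 1).any (fun i =>
            terminais.contains
              (PySem.Int.mod
                (PySem.List.pyGetD ROULETTE_ORDER (PySem.Int.mod (pos + i) 37) 0) 10)))).map
        (fun pos => PySem.List.pyGetD ROULETTE_ORDER pos 0)) := by
  rw [mem_foldl_outer]
  constructor
  · rintro (h | ⟨n, hnf, i, hi, rfl⟩)
    · simp [PySem.Set.empty] at h
    rw [List.mem_filter] at hnf
    obtain ⟨hnr, ht⟩ := hnf
    have hn := (PySem.List.mem_pyRange_one).1 hnr
    have hib := (PySem.List.mem_pyRange_one).1 hi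
    obtain ⟨h0, h1, h2⟩ := ridx_spec n hnr
    have hpm := mod37_mem_range (ridx n + i)
    have hpb := (PySem.List.mem_pyRange_one).1 hpm
    refine List.mem_map.2 ⟨PySem.Int.mod (ridx n + i) 37, List.mem_filter.2 ⟨hpm, ?_⟩, rfl⟩
    refine List.any_eq_true.2 ⟨-i, (PySem.List.mem_pyRange_one).2 ⟨by omega, by omega⟩, ?_⟩
    have hmod : PySem.Int.mod (PySem.Int.mod (ridx n + i) 37 + -i) 37 = ridx n := by
      rw [PySem.Int.mod_eq_emod_of_pos (by omega), PySem.Int.mod_eq_emod_of_pos (by omega)]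
      omega
    rw [hmod, h2]
    exact ht
  · intro h
    obtain ⟨p, hpf, rfl⟩ := List.mem_map.1 h
    rw [List.mem_filter] at hpf
    obtain ⟨hpr, hc⟩ := hpf
    have hpb := (PySem.List.mem_pyRange_one).1 hpr
    obtain ⟨i, hi, ht⟩ := List.any_eq_true.1 hc
    have hib := (PySem.List.mem_pyRange_one).1 hi
    have hqm := mod37_mem_range (p + i)
    have hqb := (PySem.List.mem_pyRange_one).1 hqm
    have hnm := get_mem_range _ hqm
    have hidx := ridx_get _ hqm
    refine Or.inr ⟨PySem.List.pyGetD ROULETTE_ORDER (PySem.Int.mod (p + i) 37) 0,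
      List.mem_filter.2 ⟨hnm, ht⟩, -i, (PySem.List.mem_pyRange_one).2 ⟨by omega, by omega⟩, ?_⟩
    rw [hidx]
    have hmod : PySem.Int.mod (PySem.Int.mod (p + i) 37 + -i) 37 = p := by
      rw [PySem.Int.mod_eq_emod_of_pos (by omega), PySem.Int.mod_eq_emod_of_pos (by omega)]
      omega
    rw [hmod]

-- ===== VERDICT (by name: the statement is the Claim_ definition above) =====
theorem gerar_entrada_com_vizinhos_spec : Claim_equal_gerar_entrada_com_vizinhos := by
  intro terminais _
  unfold Spec_gerar_entrada_com_vizinhos gerar_entrada_com_vizinhos gerar_entrada_com_vizinhos_alt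
  rw [PySem.List.foldl_append_if, List.nil_append,
    PySem.List.sorted_id_eq_sorted_id_iff_perm]
  have hA : (((PySem.List.pyRange 0 37 1).filter
        (fun n => terminais.contains (PySem.Int.mod n 10))).foldl
      (fun viz n =>
        (PySem.List.pyRange (-2) 3 1).foldl
          (fun viz i =>
            PySem.Set.add viz
              (PySem.List.pyGetD ROULETTE_ORDER (PySem.Int.mod (ridx n + i) 37) 0))
          viz)
      PySem.Set.empty).Nodup := nodup_foldl_outer List.nodup_nil
  have hB : (((PySem.List.pyRange 0 37 1).filter
        (fun pos => (PySem.List.pyRange (-2) 3 1).any (fun i =>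
          terminais.contains
            (PySem.Int.mod
              (PySem.List.pyGetD ROULETTE_ORDER (PySem.Int.mod (pos + i) 37) 0) 10)))).map
      (fun pos => PySem.List.pyGetD ROULETTE_ORDER pos 0)).Nodup := by
    have h1 := (List.filter_sublist (l := PySem.List.pyRange 0 37 1)
      (p := fun pos => (PySem.List.pyRange (-2) 3 1).any (fun i =>
        terminais.contains
          (PySem.Int.mod
            (PySem.List.pyGetD ROULETTE_ORDER (PySem.Int.mod (pos + i) 37) 0) 10)))).map
      (fun pos => PySem.List.pyGetD ROULETTE_ORDER pos 0)
    rw [map_get_eq_order] at h1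
    exact nodup_order.sublist h1
  exact (List.perm_ext_iff_of_nodup hA hB).2 (fun x => same_members terminais x)
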